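-- pv_equiv track=rewrite | github.com/Levan3998/Game-of-Life- | GameOfLife.py | matrix_size_down
-- ===== SOURCE A (Python) =====
-- def one_in_col(col, M):
--     for row in M:
--         if(row[col] == 1):
--             return True
--     return False
--
-- def pop_col(col,M):
--     for row in M:
--         row.pop(col)
--
-- def matrix_size_down(old_m):
--     if(len(old_m) == 0):
--         return old_m
--     if(len(old_m) == 1):
--         return [[0]]
--     while  len(old_m)>0 and  not (1 in old_m[0]):
--         old_m.pop(0)
--         if(len(old_m) == 0):
--             break
--     while len(old_m)>0 and (not (1 in old_m[-1])):
--         old_m.pop(-1)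
--         if(len(old_m) == 0):
--             break
--     while len(old_m)>0 and not(one_in_col(0,old_m)):
--         pop_col(0,old_m)
--         if(len(old_m) == 0):
--             break
--     while len(old_m)>0 and not (one_in_col(-1,old_m)):
--         pop_col(-1,old_m)
--         if(len(old_m) == 0):
--             break
--
--     return old_m
-- ===== SOURCE B (Python) =====
-- def matrix_size_down(old_m):
--     # One-pass bounding-box crop: find first/last row and leftmost/rightmost
--     # column containing a 1, then slice; A's single-row quirk /= here (see D_).
--     top = None
--     for i, row in enumerate(old_m):
--         if 1 in row:
--             top = i
--             break
--     if top is None: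
--         return []
--     bottom = len(old_m) - 1 - next(i for i, row in enumerate(reversed(old_m)) if 1 in row)
--     left = min(row.index(1) for row in old_m if 1 in row)
--     right = max(len(row) - 1 - row[::-1].index(1) for row in old_m if 1 in row)
--     return [row[left:right + 1] for row in old_m[top:bottom + 1]]
-- ===== Notes on version B (the rewrite author's own statement) =====
-- stated objective: faster
-- what changed: A repeatedly pops whole border rows/columns in place (each column pop rewrites every row); B computes the bounding box of the 1-entries in one scan and slices once, without mutating the input.
-- intended difference: On single-row inputs A unconditionally returns [[0]] (erasing any live cells, e.g. [[1]] -> [[0]]); B returns the actual crop of that row, which is what a border-cropping function should do. — e.g. on matrix_size_down([[1]]): A returns [[0]], B returns [[1]]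
-- outside the precondition, e.g. on matrix_size_down([[1, 0], [1]]): A returns [[1, 0], [1]], B returns [[1], [1]]
import Mathlib
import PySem

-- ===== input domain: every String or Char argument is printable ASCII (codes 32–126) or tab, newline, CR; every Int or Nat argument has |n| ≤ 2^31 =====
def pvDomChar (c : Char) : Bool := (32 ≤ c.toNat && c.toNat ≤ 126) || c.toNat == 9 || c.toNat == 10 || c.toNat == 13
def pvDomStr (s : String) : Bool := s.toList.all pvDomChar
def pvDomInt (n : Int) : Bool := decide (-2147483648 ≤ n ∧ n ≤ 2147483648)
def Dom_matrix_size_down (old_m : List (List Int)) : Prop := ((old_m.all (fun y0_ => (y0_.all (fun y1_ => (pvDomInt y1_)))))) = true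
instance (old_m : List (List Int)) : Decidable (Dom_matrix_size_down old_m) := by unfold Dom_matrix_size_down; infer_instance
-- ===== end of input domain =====

-- B replaces A's in-place border popping (A mutates old_m; equivalence is about the return
-- value) by a bounding-box scan and one slice; on single-row inputs A returns [[0]], B the crop (see D_).


-- ===== PORT A =====
def one_in_col (col : Int) (M : List (List Int)) : Bool :=
  M.any (fun row => PySem.List.pyGet? row col == some 1)

def pop_col (col : Int) (M : List (List Int)) : List (List Int) :=
  M.map (fun row =>
    match PySem.List.pop? row col with
    | some r => r.2
    | none => row)  -- Python raises IndexError here; unreachable under Pre_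

-- while len(old_m)>0 and not (1 in old_m[0]): old_m.pop(0)
def rowTrimFront : List (List Int) → List (List Int)
  | [] => []
  | r :: rs => if (1 : Int) ∈ r then r :: rs else rowTrimFront rs

-- while len(old_m)>0 and not (1 in old_m[-1]): old_m.pop(-1)
def rowTrimBack (M : List (List Int)) : List (List Int) :=
  if hM : M = [] then M
  else if (1 : Int) ∈ M.getLast hM then M else rowTrimBack M.dropLast
termination_by M.length
decreasing_by
  have : 0 < M.length := List.length_pos_iff.mpr hM
  simp [List.length_dropLast]; omega

-- termination helpers for the column-popping loops (the pops strictly shrink the total size)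
theorem sum_len_pop_col_le (col : Int) (M : List (List Int)) :
    ((pop_col col M).map List.length).sum ≤ (M.map List.length).sum := by
  induction M with
  | nil => simp [pop_col]
  | cons r rs ih =>
    simp only [pop_col, List.map_cons, List.sum_cons] at *
    have hr : (match PySem.List.pop? r col with
        | some p => p.2
        | none => r).length ≤ r.length := by
      cases h : PySem.List.pop? r col with
      | none => simp
      | some p =>
        have := PySem.List.length_of_pop?_eq_some r h
        simp; omega
    omega

theorem sum_len_pop_col_lt (col : Int) (M : List (List Int)) (hM : M ≠ [])
    (hrow : ∀ r ∈ M, r ≠ [])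
    (hpop : ∀ r ∈ M, ∃ p, PySem.List.pop? r col = some p) :
    ((pop_col col M).map List.length).sum < (M.map List.length).sum := by
  cases M with
  | nil => exact absurd rfl hM
  | cons r rs =>
    simp only [pop_col, List.map_cons, List.sum_cons]
    obtain ⟨p, hp⟩ := hpop r (by simp)
    have hlen := PySem.List.length_of_pop?_eq_some r hp
    have h2 : ((pop_col col rs).map List.length).sum ≤ (rs.map List.length).sum :=
      sum_len_pop_col_le col rs
    have hr : r ≠ [] := hrow r (by simp)
    have : 0 < r.length := List.length_pos_iff.mpr hr
    simp only [pop_col] at h2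
    have hhead : (match PySem.List.pop? r col with
        | some q => q.2
        | none => r).length = p.2.length := by rw [hp]
    rw [hhead]
    omega

theorem pop?_zero_of_ne_nil {r : List Int} (h : r ≠ []) :
    PySem.List.pop? r 0 = some (r.head h, r.tail) := by
  cases r with
  | nil => exact absurd rfl h
  | cons a t => simp [PySem.List.pop?_zero_cons]

theorem pop?_neg_one_of_ne_nil {r : List Int} (h : r ≠ []) :
    PySem.List.pop? r (-1) = some (r.getLast h, r.dropLast) := by
  conv_lhs => rw [← List.dropLast_append_getLast h]
  exact PySem.List.pop?_last r.dropLast (r.getLast h)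

-- while len(old_m)>0 and not one_in_col(0, old_m): pop_col(0, old_m)
def colTrimFront (M : List (List Int)) : List (List Int) :=
  if h : M ≠ [] ∧ one_in_col 0 M = false ∧ M.all (fun r => !r.isEmpty) then
    colTrimFront (pop_col 0 M)
  else M
termination_by (M.map List.length).sum
decreasing_by
  refine sum_len_pop_col_lt 0 M h.1 ?_ ?_
  · intro r hr
    have := h.2.2
    simp only [List.all_eq_true] at this
    have := this r hr
    simpa using this
  · intro r hr
    have := h.2.2
    simp only [List.all_eq_true] at this
    have hne : r ≠ [] := by have := this r hr; simpa using this
    exact ⟨_, pop?_zero_of_ne_nil hne⟩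

-- while len(old_m)>0 and not one_in_col(-1, old_m): pop_col(-1, old_m)
def colTrimBack (M : List (List Int)) : List (List Int) :=
  if h : M ≠ [] ∧ one_in_col (-1) M = false ∧ M.all (fun r => !r.isEmpty) then
    colTrimBack (pop_col (-1) M)
  else M
termination_by (M.map List.length).sum
decreasing_by
  refine sum_len_pop_col_lt (-1) M h.1 ?_ ?_
  · intro r hr
    have := h.2.2
    simp only [List.all_eq_true] at this
    have := this r hr
    simpa using this
  · intro r hr
    have := h.2.2
    simp only [List.all_eq_true] at this
    have hne : r ≠ [] := by have := this r hr; simpa using this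
    exact ⟨_, pop?_neg_one_of_ne_nil hne⟩

def matrix_size_down (old_m : List (List Int)) : List (List Int) :=
  if old_m.length == 0 then old_m
  else if old_m.length == 1 then [[0]]
  else colTrimBack (colTrimFront (rowTrimBack (rowTrimFront old_m)))

-- ===== PORT B =====
def has1 (r : List Int) : Bool := r.contains 1

def matrix_size_down_alt (old_m : List (List Int)) : List (List Int) :=
  match old_m.findIdx? has1 with
  | none => []
  | some top =>
    let bottom := old_m.length - 1 - old_m.reverse.findIdx has1
    let ones := old_m.filter has1
    -- min/max over nonempty generators (.getD 0 is unreachable: ones ≠ [] once top is found)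
    let left := (PySem.List.min? (ones.map (fun r => r.findIdx (· == 1))) (fun x => x)).getD 0
    let right := (PySem.List.max? (ones.map (fun r => r.length - 1 - r.reverse.findIdx (· == 1))) (fun x => x)).getD 0
    (PySem.List.slice old_m (some (top : Int)) (some ((bottom + 1 : Nat) : Int))).map
      (fun row => PySem.List.slice row (some (left : Int)) (some ((right + 1 : Nat) : Int)))

-- ===== PRECONDITION & SPEC =====
-- Pre_ excludes ragged (non-rectangular) matrices that contain a 1: there A's per-row pop(0)/pop(-1)
-- "column" trimming removes differently-positioned cells from different rows (and raises IndexError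
-- once a row runs empty), which is not a column crop at all; ragged matrices with no 1 are kept.
def Pre_matrix_size_down (old_m : List (List Int)) : Prop :=
  (∀ r ∈ old_m, r.length = (old_m.headD []).length) ∨ (∀ r ∈ old_m, (1 : Int) ∉ r)
instance (old_m : List (List Int)) : Decidable (Pre_matrix_size_down old_m) := by
  unfold Pre_matrix_size_down; infer_instance

def pvWitness_matrix_size_down : List (List Int) := [[1, 0], [0, 0]]

-- On single-row inputs A unconditionally returns [[0]] (erasing live cells, e.g. [[1]] ↦ [[0]]);
-- B returns the actual crop of that row, which is what a border-cropping function should do.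
def D_matrix_size_down (old_m : List (List Int)) : Prop := old_m.length = 1
instance (old_m : List (List Int)) : Decidable (D_matrix_size_down old_m) := by
  unfold D_matrix_size_down; infer_instance

def Spec_matrix_size_down (old_m : List (List Int)) (out : List (List Int)) : Prop :=
  ¬ D_matrix_size_down old_m → out = matrix_size_down_alt old_m
instance (old_m : List (List Int)) (out : List (List Int)) : Decidable (Spec_matrix_size_down old_m out) := by
  unfold Spec_matrix_size_down; infer_instance

def pvDiffWitness_matrix_size_down : List (List Int) := [[1]]
def pvDiffWitnessOut_matrix_size_down : (List (List Int)) × (List (List Int)) := ([[0]], [[1]])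

-- ===== CLAIM (what is proved, stated in full; the proofs are below) =====
def Claim_unchanged_matrix_size_down : Prop := ∀ (old_m : List (List Int)), Dom_matrix_size_down old_m → Pre_matrix_size_down old_m → Spec_matrix_size_down old_m (matrix_size_down old_m)
def Claim_changed_matrix_size_down : Prop := Dom_matrix_size_down (pvDiffWitness_matrix_size_down) ∧ Pre_matrix_size_down (pvDiffWitness_matrix_size_down) ∧ D_matrix_size_down (pvDiffWitness_matrix_size_down) ∧ matrix_size_down (pvDiffWitness_matrix_size_down) = pvDiffWitnessOut_matrix_size_down.1 ∧ matrix_size_down_alt (pvDiffWitness_matrix_size_down) = pvDiffWitnessOut_matrix_size_down.2 ∧ pvDiffWitnessOut_matrix_size_down.1 ≠ pvDiffWitnessOut_matrix_size_down.2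
def Claim_exact_matrix_size_down : Prop := ∀ (old_m : List (List Int)), Dom_matrix_size_down old_m → Pre_matrix_size_down old_m → D_matrix_size_down old_m → matrix_size_down old_m ≠ matrix_size_down_alt old_m

-- ===== LEMMAS AND PROOFS =====

theorem has1_iff (r : List Int) : has1 r = true ↔ (1 : Int) ∈ r := by
  simp [has1]

theorem findIdx_le_of_some {α : Type} {p : α → Bool} {l : List α} {j : Nat} {x : α}
    (h : l[j]? = some x) (hp : p x = true) : l.findIdx p ≤ j := by
  obtain ⟨hj, rfl⟩ := List.getElem?_eq_some_iff.mp h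
  by_contra h'
  have hf : p l[j] = false := List.not_of_lt_findIdx (by omega)
  rw [hp] at hf
  simp at hf

theorem findIdx_take_of_lt {p : Int → Bool} (l : List Int) (n : Nat)
    (h : l.findIdx p < n) : (l.take n).findIdx p = l.findIdx p := by
  induction l generalizing n with
  | nil => simp
  | cons a t ih =>
    cases n with
    | zero => omega
    | succ m =>
      by_cases ha : p a
      · simp [List.findIdx_cons, ha]
      · have h' : t.findIdx p < m := by
          simp [List.findIdx_cons, ha] at h; omega
        simp [List.findIdx_cons, ha, ih m h']

theorem rowTrimFront_eq_drop (M : List (List Int)) :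
    rowTrimFront M = M.drop (M.findIdx has1) := by
  induction M with
  | nil => rfl
  | cons r rs ih =>
    by_cases h1 : (1 : Int) ∈ r
    · simp [rowTrimFront, h1, List.findIdx_cons, has1]
    · simp [rowTrimFront, h1, List.findIdx_cons, has1, ih]

theorem rowTrimBack_eq (M : List (List Int)) :
    rowTrimBack M = (rowTrimFront M.reverse).reverse := by
  induction hn : M.length using Nat.strong_induction_on generalizing M with
  | _ n ih =>
    by_cases hne : M = []
    · subst hne; simp [rowTrimBack, rowTrimFront]
    · have hsplit : M.dropLast ++ [M.getLast hne] = M := List.dropLast_append_getLast hne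
      have hrev : M.reverse = M.getLast hne :: M.dropLast.reverse := by
        conv_lhs => rw [← hsplit]
        simp
      by_cases h1 : (1 : Int) ∈ M.getLast hne
      · rw [rowTrimBack, dif_neg hne, if_pos h1, hrev]
        simp only [rowTrimFront, if_pos h1]
        rw [← hrev, List.reverse_reverse]
      · rw [rowTrimBack, dif_neg hne, if_neg h1, hrev]
        simp only [rowTrimFront, if_neg h1]
        have hlt : M.dropLast.length < n := by
          subst hn
          have : 0 < M.length := List.length_pos_iff.mpr hne
          simp [List.length_dropLast]; omega
        exact ih M.dropLast.length hlt M.dropLast rfl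

theorem pop_col_zero_eq (M : List (List Int)) (h : ∀ r ∈ M, r ≠ []) :
    pop_col 0 M = M.map List.tail := by
  unfold pop_col
  refine List.map_congr_left ?_
  intro r hr
  rw [pop?_zero_of_ne_nil (h r hr)]

theorem pop_col_neg_one_eq (M : List (List Int)) (h : ∀ r ∈ M, r ≠ []) :
    pop_col (-1) M = M.map List.dropLast := by
  unfold pop_col
  refine List.map_congr_left ?_
  intro r hr
  rw [pop?_neg_one_of_ne_nil (h r hr)]

theorem findIdx_one {r : List Int} (h : (1 : Int) ∈ r) :
    r.findIdx (· == 1) < r.length ∧ r[r.findIdx (· == 1)]? = some 1 := by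
  have hlt : r.findIdx (· == 1) < r.length := List.findIdx_lt_length.mpr ⟨1, h, by simp⟩
  refine ⟨hlt, ?_⟩
  rw [List.getElem?_eq_getElem hlt]
  have := List.findIdx_getElem (p := (· == 1)) (xs := r) (w := hlt)
  simpa using this

theorem colTrimFront_eq (L : Nat) : ∀ (w : Nat) (M : List (List Int)), M ≠ [] →
    (∀ r ∈ M, r.length = w) →
    (∀ r ∈ M, has1 r = true → L ≤ r.findIdx (· == 1)) →
    (∃ r ∈ M, has1 r = true ∧ r.findIdx (· == 1) = L) →
    colTrimFront M = M.map (List.drop L) := by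
  induction L with
  | zero =>
    intro w M hne hrect hmin hex
    obtain ⟨r0, hr0M, hr0has, hr0idx⟩ := hex
    have hr0mem : (1 : Int) ∈ r0 := (has1_iff r0).mp hr0has
    obtain ⟨hlt, hval⟩ := findIdx_one hr0mem
    have h0 : r0[0]? = some 1 := by rw [← hr0idx]; exact hval
    have honecol : one_in_col 0 M = true := by
      unfold one_in_col
      rw [List.any_eq_true]
      refine ⟨r0, hr0M, ?_⟩
      rw [PySem.List.pyGet?_zero, h0]
      simp
    rw [colTrimFront, dif_neg (by simp [honecol])]
    refine ((List.map_congr_left (fun r _ => List.drop_zero)).trans (List.map_id M)).symm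
  | succ L ih =>
    intro w M hne hrect hmin hex
    obtain ⟨r0, hr0M, hr0has, hr0idx⟩ := hex
    have hr0mem : (1 : Int) ∈ r0 := (has1_iff r0).mp hr0has
    obtain ⟨hlt, _⟩ := findIdx_one hr0mem
    have hw : 0 < w := by
      have := hrect r0 hr0M; omega
    have hrowne : ∀ r ∈ M, r ≠ [] := by
      intro r hr
      have := hrect r hr
      exact List.length_pos_iff.mp (by omega)
    have hhead : ∀ r ∈ M, ∀ (h : r ≠ []), r.head h ≠ 1 := by
      intro r hr h
      obtain ⟨a, t, rfl⟩ := List.exists_cons_of_ne_nil h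
      simp only [List.head_cons]
      by_cases hh : has1 (a :: t) = true
      · have hle := hmin _ hr hh
        have := List.not_of_lt_findIdx (p := (· == 1)) (xs := a :: t) (i := 0)
          (by omega)
        simpa using this
      · intro ha
        exact hh ((has1_iff _).mpr (by rw [← ha]; simp))
    have hguard : one_in_col 0 M = false := by
      unfold one_in_col
      rw [List.any_eq_false]
      intro r hr
      have hne' := hrowne r hr
      obtain ⟨a, t, rfl⟩ := List.exists_cons_of_ne_nil hne'
      have := hhead _ hr (by simp)
      simp only [List.head_cons] at this
      simp [this]
    have hall : M.all (fun r => !r.isEmpty) = true := by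
      rw [List.all_eq_true]
      intro r hr
      simpa using hrowne r hr
    rw [colTrimFront, dif_pos ⟨hne, hguard, hall⟩, pop_col_zero_eq M hrowne]
    rw [ih (w - 1) (M.map List.tail) (by simpa using hne) ?_ ?_ ?_]
    · rw [List.map_map]
      refine List.map_congr_left ?_
      intro r _
      exact List.drop_tail
    · intro r' hr'
      obtain ⟨r, hrM, rfl⟩ := List.mem_map.mp hr'
      rw [List.length_tail, hrect r hrM]
    · intro r' hr' hh
      obtain ⟨r, hrM, rfl⟩ := List.mem_map.mp hr'
      obtain ⟨a, t, rfl⟩ := List.exists_cons_of_ne_nil (hrowne r hrM)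
      simp only [List.tail_cons] at hh ⊢
      have h1t : (1 : Int) ∈ t := (has1_iff t).mp hh
      have hhasr : has1 (a :: t) = true := (has1_iff _).mpr (by simp [h1t])
      have hle := hmin _ hrM hhasr
      have ha : (a == (1 : Int)) = false := by
        have := hhead _ hrM (by simp)
        simp only [List.head_cons] at this
        simpa using this
      rw [List.findIdx_cons, ha] at hle
      simp only [cond_false] at hle
      omega
    · obtain ⟨a, t, hr0⟩ := List.exists_cons_of_ne_nil (hrowne r0 hr0M)
      subst hr0
      have ha : (a == (1 : Int)) = false := by
        have := hhead _ hr0M (by simp)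
        simp only [List.head_cons] at this
        simpa using this
      refine ⟨t, List.mem_map.mpr ⟨a :: t, hr0M, rfl⟩, ?_, ?_⟩
      · refine (has1_iff t).mpr ?_
        rcases List.mem_cons.mp hr0mem with h | h
        · exact absurd h.symm (by simpa using ha)
        · exact h
      · rw [List.findIdx_cons, ha] at hr0idx
        simp only [cond_false] at hr0idx
        omega

theorem reverse_dropLast' (r : List Int) : r.dropLast.reverse = r.reverse.tail := by
  rw [List.dropLast_eq_take, ← List.drop_one, List.drop_reverse]

theorem colTrimBack_eq (E : Nat) : ∀ (w : Nat) (M : List (List Int)), M ≠ [] →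
    (∀ r ∈ M, r.length = w) →
    (∀ r ∈ M, has1 r = true → E ≤ r.reverse.findIdx (· == 1)) →
    (∃ r ∈ M, has1 r = true ∧ r.reverse.findIdx (· == 1) = E) →
    colTrimBack M = M.map (List.take (w - E)) := by
  induction E with
  | zero =>
    intro w M hne hrect hmin hex
    obtain ⟨r0, hr0M, hr0has, hr0idx⟩ := hex
    have hr0mem : (1 : Int) ∈ r0.reverse := by
      rw [List.mem_reverse]; exact (has1_iff r0).mp hr0has
    obtain ⟨hlt, hval⟩ := findIdx_one hr0mem
    have h0 : r0.reverse[0]? = some 1 := by rw [← hr0idx]; exact hval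
    have hglast : r0.getLast? = some 1 := by
      rw [← List.head?_reverse, List.head?_eq_getElem?, h0]
    have honecol : one_in_col (-1) M = true := by
      unfold one_in_col
      rw [List.any_eq_true]
      refine ⟨r0, hr0M, ?_⟩
      rw [PySem.List.pyGet?_neg_one, hglast]
      simp
    rw [colTrimBack, dif_neg (by simp [honecol])]
    rw [Nat.sub_zero]
    refine ((List.map_congr_left ?_).trans (List.map_id M)).symm
    intro r hr
    rw [← hrect r hr]
    exact List.take_length
  | succ E ih =>
    intro w M hne hrect hmin hex
    obtain ⟨r0, hr0M, hr0has, hr0idx⟩ := hex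
    have hr0mem : (1 : Int) ∈ r0.reverse := by
      rw [List.mem_reverse]; exact (has1_iff r0).mp hr0has
    obtain ⟨hlt, _⟩ := findIdx_one hr0mem
    have hw : 0 < w := by
      have := hrect r0 hr0M
      rw [List.length_reverse] at hlt
      omega
    have hrowne : ∀ r ∈ M, r ≠ [] := by
      intro r hr
      have := hrect r hr
      exact List.length_pos_iff.mp (by omega)
    have hrevne : ∀ r ∈ M, r.reverse ≠ [] := by
      intro r hr
      simpa using hrowne r hr
    have hlast : ∀ r ∈ M, ∀ (h : r.reverse ≠ []), r.reverse.head h ≠ 1 := by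
      intro r hr h
      by_cases hh : has1 r = true
      · have hle := hmin _ hr hh
        have := List.not_of_lt_findIdx (p := (· == 1)) (xs := r.reverse) (i := 0)
          (by omega)
        rw [List.head_eq_getElem h]
        simpa using this
      · intro ha
        refine hh ((has1_iff _).mpr ?_)
        rw [← List.mem_reverse, ← ha]
        exact List.head_mem h
    have hguard : one_in_col (-1) M = false := by
      unfold one_in_col
      rw [List.any_eq_false]
      intro r hr
      have hne' := hrevne r hr
      have hhd := hlast r hr hne'
      rw [PySem.List.pyGet?_neg_one, ← List.head?_reverse, List.head?_eq_some_head hne']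
      simpa using hhd
    have hall : M.all (fun r => !r.isEmpty) = true := by
      rw [List.all_eq_true]
      intro r hr
      simpa using hrowne r hr
    rw [colTrimBack, dif_pos ⟨hne, hguard, hall⟩, pop_col_neg_one_eq M hrowne]
    rw [ih (w - 1) (M.map List.dropLast) (by simpa using hne) ?_ ?_ ?_]
    · rw [List.map_map]
      refine List.map_congr_left ?_
      intro r hr
      simp only [Function.comp_apply]
      rw [List.dropLast_eq_take, List.take_take, hrect r hr]
      congr 1
      omega
    · intro r' hr'
      obtain ⟨r, hrM, rfl⟩ := List.mem_map.mp hr'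
      rw [List.length_dropLast, hrect r hrM]
    · intro r' hr' hh
      obtain ⟨r, hrM, rfl⟩ := List.mem_map.mp hr'
      have h1d : (1 : Int) ∈ r.dropLast.reverse := by
        rw [List.mem_reverse]; exact (has1_iff _).mp hh
      rw [reverse_dropLast'] at h1d ⊢
      have h1r : (1 : Int) ∈ r.reverse := List.mem_of_mem_tail h1d
      have hhasr : has1 r = true := (has1_iff _).mpr (by rwa [← List.mem_reverse])
      have hle := hmin _ hrM hhasr
      obtain ⟨b, t, hbt⟩ := List.exists_cons_of_ne_nil (hrevne r hrM)
      rw [hbt] at hle ⊢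
      have hb : (b == (1 : Int)) = false := by
        by_contra hbc
        rw [List.findIdx_cons, (by simpa using hbc : (b == (1 : Int)) = true)] at hle
        simp at hle
      rw [List.findIdx_cons, hb] at hle
      simp only [cond_false] at hle
      simp only [List.tail_cons]
      omega
    · obtain ⟨b, t, hbt⟩ := List.exists_cons_of_ne_nil (hrevne r0 hr0M)
      have hidx := hr0idx
      rw [hbt] at hidx
      have hb : (b == (1 : Int)) = false := by
        by_contra hbc
        rw [List.findIdx_cons, (by simpa using hbc : (b == (1 : Int)) = true)] at hidx
        simp at hidx
      rw [List.findIdx_cons, hb] at hidx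
      simp only [cond_false] at hidx
      refine ⟨r0.dropLast, List.mem_map.mpr ⟨r0, hr0M, rfl⟩, ?_, ?_⟩
      · refine (has1_iff _).mpr ?_
        rw [← List.mem_reverse, reverse_dropLast', hbt, List.tail_cons]
        have hm := hr0mem
        rw [hbt] at hm
        rcases List.mem_cons.mp hm with h | h
        · exact absurd h.symm (by simpa using hb)
        · exact h
      · rw [reverse_dropLast', hbt, List.tail_cons]
        omega

theorem alt_of_some (M : List (List Int)) (t : Nat) (Lval Rval : Nat)
    (htop : M.findIdx? has1 = some t)
    (hLm : PySem.List.min? ((M.filter has1).map (fun r => r.findIdx (· == 1))) (fun x => x) = some Lval)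
    (hRm : PySem.List.max? ((M.filter has1).map (fun r => r.length - 1 - r.reverse.findIdx (· == 1))) (fun x => x) = some Rval) :
    matrix_size_down_alt M =
      ((M.drop t).take (M.length - 1 - M.reverse.findIdx has1 + 1 - t)).map
        (fun row => (row.drop Lval).take (Rval + 1 - Lval)) := by
  unfold matrix_size_down_alt
  simp only [htop, hLm, hRm, Option.getD_some, PySem.List.slice_natCast]

theorem matrix_size_down_spec : Claim_unchanged_matrix_size_down := by
  unfold Claim_unchanged_matrix_size_down
  intro M hdom hpre
  unfold Spec_matrix_size_down D_matrix_size_down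
  intro hD
  by_cases h0 : M = []
  · subst h0; rfl
  have hpos : 0 < M.length := List.length_pos_iff.mpr h0
  have hlen2 : 2 ≤ M.length := by omega
  have hA : matrix_size_down M = colTrimBack (colTrimFront (rowTrimBack (rowTrimFront M))) := by
    unfold matrix_size_down
    rw [if_neg (by simp; omega), if_neg (by simp; omega)]
  by_cases hany : ∃ r ∈ M, has1 r = true
  case neg =>
    have hall : ∀ r ∈ M, has1 r = false := by
      intro r hr
      rcases Bool.eq_false_or_eq_true (has1 r) with h | h
      · exact absurd ⟨r, hr, h⟩ hany
      · exact h
    have hnone : M.findIdx? has1 = none := List.findIdx?_eq_none_iff.mpr hall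
    have hB : matrix_size_down_alt M = [] := by
      unfold matrix_size_down_alt
      simp only [hnone]
    have hfr : rowTrimFront M = [] := by
      rw [rowTrimFront_eq_drop, List.findIdx_eq_length.mpr hall, List.drop_length]
    have h1 : rowTrimBack ([] : List (List Int)) = [] := by rw [rowTrimBack]; simp
    have h2 : colTrimFront ([] : List (List Int)) = [] := by rw [colTrimFront]; simp
    have h3 : colTrimBack ([] : List (List Int)) = [] := by rw [colTrimBack]; simp
    rw [hA, hfr, h1, h2, h3, hB]
  case pos =>
    obtain ⟨ra, hraM, hrahas⟩ := hany
    have hrect : ∀ r ∈ M, r.length = (M.headD []).length := by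
      rcases hpre with h | h
      · exact h
      · exact absurd ((has1_iff ra).mp hrahas) (h ra hraM)
    set w := (M.headD []).length with hwdef
    set t := M.findIdx has1 with htdef
    set k := M.reverse.findIdx has1 with hkdef
    have htop : M.findIdx? has1 = some t := List.findIdx?_eq_some_of_exists ⟨ra, hraM, hrahas⟩
    have htlt : t < M.length := List.findIdx_lt_length.mpr ⟨ra, hraM, hrahas⟩
    have hklt : k < M.length := by
      have := List.findIdx_lt_length.mpr ⟨ra, List.mem_reverse.mpr hraM, hrahas⟩
      simpa [hkdef] using this
    have htval : has1 (M[t]'htlt) = true := List.findIdx_getElem (w := htlt)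
    have htq : M[t]? = some (M[t]'htlt) := List.getElem?_eq_getElem htlt
    have hkle : t + k + 1 ≤ M.length := by
      have hq : M.reverse[M.length - 1 - t]? = M[t]? := by
        have h' := List.getElem?_reverse (l := M) (i := M.length - 1 - t) (by omega)
        rwa [(by omega : M.length - 1 - (M.length - 1 - t) = t)] at h'
      have := findIdx_le_of_some (hq.trans htq) htval
      omega
    have hk' : (M.drop t).reverse.findIdx has1 = k := by
      have hsplit : M.reverse = (M.drop t).reverse ++ (M.take t).reverse := by
        conv_lhs => rw [← List.take_append_drop t M]
        rw [List.reverse_append]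
      have hmem : M[t]'htlt ∈ (M.drop t).reverse := by
        rw [List.mem_reverse]
        refine List.mem_of_getElem? (i := 0) ?_
        rw [List.getElem?_drop]
        simp only [Nat.add_zero]
        exact htq
      have hhit : (M.drop t).reverse.findIdx has1 < (M.drop t).reverse.length :=
        List.findIdx_lt_length.mpr ⟨_, hmem, htval⟩
      rw [hkdef, hsplit, List.findIdx_append, if_pos hhit]
    have hM1row : rowTrimBack (rowTrimFront M) = (M.drop t).take (M.length - t - k) := by
      rw [rowTrimFront_eq_drop, rowTrimBack_eq, rowTrimFront_eq_drop, hk']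
      rw [List.drop_reverse, List.reverse_reverse, List.length_drop]
    set M1 := (M.drop t).take (M.length - t - k) with hM1def
    have hlen1 : M1.length = M.length - t - k := by
      rw [hM1def, List.length_take, List.length_drop]; omega
    have hM1ne : M1 ≠ [] := List.ne_nil_of_length_pos (by omega)
    have hsub : ∀ r ∈ M1, r ∈ M := fun r hr => List.mem_of_mem_drop (List.mem_of_mem_take hr)
    have hrect1 : ∀ r ∈ M1, r.length = w := fun r hr => hrect r (hsub r hr)
    have hmem1 : ∀ r ∈ M, has1 r = true → r ∈ M1 := by
      intro r hr hhr
      obtain ⟨j, hj, hjr⟩ := List.getElem_of_mem hr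
      have hjq : M[j]? = some r := by rw [List.getElem?_eq_getElem hj, hjr]
      have hjt : t ≤ j := findIdx_le_of_some hjq hhr
      have hjk : j + k + 1 ≤ M.length := by
        have hq : M.reverse[M.length - 1 - j]? = M[j]? := by
          have h' := List.getElem?_reverse (l := M) (i := M.length - 1 - j) (by omega)
          rwa [(by omega : M.length - 1 - (M.length - 1 - j) = j)] at h'
        have := findIdx_le_of_some (hq.trans hjq) hhr
        omega
      refine List.mem_of_getElem? (i := j - t) ?_
      rw [hM1def, List.getElem?_take, if_pos (by omega), List.getElem?_drop,
        (by omega : t + (j - t) = j), hjq]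
    set ones := M.filter has1 with honesdef
    have hra1 : ra ∈ ones := by rw [honesdef, List.mem_filter]; exact ⟨hraM, hrahas⟩
    have hrow : ∀ r ∈ ones, r.findIdx (· == 1) + r.reverse.findIdx (· == 1) + 1 ≤ w ∧ r ∈ M ∧ has1 r = true := by
      intro r hr
      obtain ⟨hrM, hrh⟩ := List.mem_filter.mp hr
      have h1r : (1 : Int) ∈ r := (has1_iff r).mp hrh
      have hwr : r.length = w := hrect r hrM
      obtain ⟨hfrlt, hfrq⟩ := findIdx_one h1r
      have h1rev : (1 : Int) ∈ r.reverse := List.mem_reverse.mpr h1r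
      obtain ⟨herlt, herq⟩ := findIdx_one h1rev
      rw [List.length_reverse] at herlt
      have hq : r[r.length - 1 - r.reverse.findIdx (· == 1)]? = some 1 := by
        have h' := List.getElem?_reverse (l := r) (i := r.reverse.findIdx (· == 1)) herlt
        rw [← h']; exact herq
      have := findIdx_le_of_some (p := (· == 1)) hq (by simp)
      exact ⟨by omega, hrM, hrh⟩
    cases hLm : PySem.List.min? (ones.map (fun r => r.findIdx (· == 1))) (fun x => x) with
    | none =>
      have hnil := (PySem.List.min?_eq_none_iff _ _).mp hLm
      rw [List.map_eq_nil_iff] at hnil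
      exact absurd hnil (List.ne_nil_of_mem hra1)
    | some Lval =>
    cases hRm : PySem.List.max? (ones.map (fun r => r.length - 1 - r.reverse.findIdx (· == 1))) (fun x => x) with
    | none =>
      have hnil := (PySem.List.max?_eq_none_iff _ _).mp hRm
      rw [List.map_eq_nil_iff] at hnil
      exact absurd hnil (List.ne_nil_of_mem hra1)
    | some Rval =>
    have hLmin : ∀ r ∈ ones, Lval ≤ r.findIdx (· == 1) := by
      intro r hr
      exact PySem.List.min?_isMin hLm _ (List.mem_map_of_mem hr)
    have hRmax : ∀ r ∈ ones, r.length - 1 - r.reverse.findIdx (· == 1) ≤ Rval := by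
      intro r hr
      exact PySem.List.max?_isMax hRm _ (List.mem_map_of_mem hr)
    obtain ⟨rL, hrL, hrLidx⟩ : ∃ rL ∈ ones, rL.findIdx (· == 1) = Lval := by
      obtain ⟨rL, h1, h2⟩ := List.mem_map.mp (PySem.List.min?_mem hLm)
      exact ⟨rL, h1, h2⟩
    obtain ⟨rR, hrR, hrRidx⟩ : ∃ rR ∈ ones, rR.length - 1 - rR.reverse.findIdx (· == 1) = Rval := by
      obtain ⟨rR, h1, h2⟩ := List.mem_map.mp (PySem.List.max?_mem hRm)
      exact ⟨rR, h1, h2⟩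
    have hwrL : rL.length = w := hrect rL (hrow rL hrL).2.1
    have hwrR : rR.length = w := hrect rR (hrow rR hrR).2.1
    have hLR : Lval ≤ Rval := by
      have h1 := (hrow rL hrL).1
      have h2 := hRmax rL hrL
      omega
    have hRw : Rval + 1 ≤ w := by
      have h1 := (hrow rR hrR).1
      omega
    have hcf : colTrimFront M1 = M1.map (List.drop Lval) := by
      refine colTrimFront_eq Lval w M1 hM1ne hrect1 ?_ ?_
      · intro r hr hh
        exact hLmin r (List.mem_filter.mpr ⟨hsub r hr, hh⟩)
      · exact ⟨rL, hmem1 rL (hrow rL hrL).2.1 (hrow rL hrL).2.2, (hrow rL hrL).2.2, hrLidx⟩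
    have hcb : colTrimBack (M1.map (List.drop Lval)) =
        (M1.map (List.drop Lval)).map (List.take ((w - Lval) - (w - 1 - Rval))) := by
      refine colTrimBack_eq (w - 1 - Rval) (w - Lval) _ (by simpa using hM1ne) ?_ ?_ ?_
      · intro r' hr'
        obtain ⟨r, hrM1, rfl⟩ := List.mem_map.mp hr'
        rw [List.length_drop, hrect1 r hrM1]
      · intro r' hr' hh
        obtain ⟨r, hrM1, rfl⟩ := List.mem_map.mp hr'
        have h1r : (1 : Int) ∈ r := List.mem_of_mem_drop ((has1_iff _).mp hh)
        have hrones : r ∈ ones := List.mem_filter.mpr ⟨hsub r hrM1, (has1_iff r).mpr h1r⟩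
        have h5 := (hrow r hrones).1
        have h6 := hLmin r hrones
        have h7 := hRmax r hrones
        have hwr : r.length = w := hrect1 r hrM1
        have heq : (r.drop Lval).reverse.findIdx (· == 1) = r.reverse.findIdx (· == 1) := by
          rw [List.reverse_drop]
          exact findIdx_take_of_lt _ _ (by omega)
        rw [heq]; omega
      · have hrRM1 : rR ∈ M1 := hmem1 rR (hrow rR hrR).2.1 (hrow rR hrR).2.2
        have h5 := (hrow rR hrR).1
        have h6 := hLmin rR hrR
        have h1r : (1 : Int) ∈ rR := (has1_iff _).mp (hrow rR hrR).2.2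
        obtain ⟨hfrlt, hfrq⟩ := findIdx_one h1r
        refine ⟨rR.drop Lval, List.mem_map_of_mem hrRM1, ?_, ?_⟩
        · refine (has1_iff _).mpr (List.mem_of_getElem? (i := rR.findIdx (· == 1) - Lval) ?_)
          rw [List.getElem?_drop, (by omega : Lval + (rR.findIdx (· == 1) - Lval) = rR.findIdx (· == 1))]
          exact hfrq
        · have heq : (rR.drop Lval).reverse.findIdx (· == 1) = rR.reverse.findIdx (· == 1) := by
            rw [List.reverse_drop]
            exact findIdx_take_of_lt _ _ (by omega)
          rw [heq]; omega
    rw [alt_of_some M t Lval Rval htop (honesdef ▸ hLm) (honesdef ▸ hRm), hA, hM1row, hcf, hcb]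
    rw [List.map_map]
    rw [(by omega : M.length - 1 - k + 1 - t = M.length - t - k),
      (by omega : (w - Lval) - (w - 1 - Rval) = Rval + 1 - Lval)]
    rfl

theorem matrix_size_down_changed : Claim_changed_matrix_size_down := by
  unfold Claim_changed_matrix_size_down; decide

theorem matrix_size_down_tight : Claim_exact_matrix_size_down := by
  unfold Claim_exact_matrix_size_down
  intro M hdom hpre hD
  unfold D_matrix_size_down at hD
  obtain ⟨r, rs, rfl⟩ : ∃ r rs, M = r :: rs := by
    cases M with
    | nil => simp at hD
    | cons r rs => exact ⟨r, rs, rfl⟩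
  obtain rfl : rs = [] := by simpa using hD
  have hAval : matrix_size_down [r] = [[0]] := by
    unfold matrix_size_down
    simp
  rw [hAval]
  by_cases hh : has1 r = true
  · have h1r : (1 : Int) ∈ r := (has1_iff r).mp hh
    obtain ⟨hfrlt, hfrq⟩ := findIdx_one h1r
    have h1rev : (1 : Int) ∈ r.reverse := List.mem_reverse.mpr h1r
    obtain ⟨herlt, herq⟩ := findIdx_one h1rev
    rw [List.length_reverse] at herlt
    have hfrle : r.findIdx (· == 1) ≤ r.length - 1 - r.reverse.findIdx (· == 1) := by
      have hq : r[r.length - 1 - r.reverse.findIdx (· == 1)]? = some 1 := by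
        have h' := List.getElem?_reverse (l := r) (i := r.reverse.findIdx (· == 1)) herlt
        rw [← h']; exact herq
      exact findIdx_le_of_some (p := (· == 1)) hq (by simp)
    have htop : List.findIdx? has1 [r] = some 0 := by
      rw [List.findIdx?_cons, if_pos hh]
    have halt : matrix_size_down_alt [r] =
        [(r.drop (r.findIdx (· == 1))).take
          ((r.length - 1 - r.reverse.findIdx (· == 1)) + 1 - r.findIdx (· == 1))] := by
      rw [alt_of_some [r] 0 (r.findIdx (· == 1)) (r.length - 1 - r.reverse.findIdx (· == 1)) htop ?_ ?_]
      · simp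
      · have hones : List.filter has1 [r] = [r] := by simp [hh]
        rw [hones, List.map_cons, List.map_nil, PySem.List.min?_id_cons]
        simp
      · have hones : List.filter has1 [r] = [r] := by simp [hh]
        rw [hones, List.map_cons, List.map_nil, PySem.List.max?_id_cons]
        simp
    rw [halt]
    intro hEq
    have h1 : ([0] : List Int) = (r.drop (r.findIdx (· == 1))).take
        ((r.length - 1 - r.reverse.findIdx (· == 1)) + 1 - r.findIdx (· == 1)) := by
      injection hEq
    have hEq2 : ((r.drop (r.findIdx (· == 1))).take
        ((r.length - 1 - r.reverse.findIdx (· == 1)) + 1 - r.findIdx (· == 1)))[0]? = some 0 := by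
      rw [← h1]; rfl
    rw [List.getElem?_take, if_pos (by omega), List.getElem?_drop, Nat.add_zero, hfrq] at hEq2
    simp at hEq2
  · have hnone : List.findIdx? has1 [r] = none := by
      rw [List.findIdx?_cons, if_neg hh]
      simp
    have halt : matrix_size_down_alt [r] = [] := by
      unfold matrix_size_down_alt
      simp only [hnone]
    rw [halt]
    simp
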